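-- pv_equiv track=rewrite | github.com/AndreAlbu/Questoes-beecrowd-Python | 2722.py | forma_nome
-- ===== SOURCE A (Python) =====
-- def forma_nome(nome, sobrenome):
--
--     junta_nome1 = [ ]
--
--     inicio1 = 0
--
--     for n in range(2, len(nome) + 2, 2):
--
--         parte1 = nome[inicio1: inicio1 + 2]
--
--         junta_nome1.insert(inicio1, parte1)
--
--         inicio1 = n
--
--     inicio2 = 0
--
--     for s in range(2, len(sobrenome) + 2, 2):
--
--         parte2 = sobrenome[inicio2: inicio2 + 2]
--
--         junta_nome1.insert(inicio2 + 1, parte2)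
--
--         inicio2 = s
--
--     nome_final = ''.join(junta_nome1)
--
--     return nome_final
-- ===== SOURCE B (Python) =====
-- def forma_nome(nome, sobrenome):
--     parts = []
--     i = 0
--     while i < len(nome) or i < len(sobrenome):
--         parts.append(nome[i:i+2])
--         parts.append(sobrenome[i:i+2])
--         i += 2
--     return ''.join(parts)
-- ===== Notes on version B (the rewrite author's own statement) =====
-- stated objective: faster
-- what changed: Replaces A's two chunking loops with position-computed list.insert calls (each shifting the tail of the chunk list) by a single fused pass over one index i that appends the 2-char slices of both strings in lockstep.
import Mathlib
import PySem

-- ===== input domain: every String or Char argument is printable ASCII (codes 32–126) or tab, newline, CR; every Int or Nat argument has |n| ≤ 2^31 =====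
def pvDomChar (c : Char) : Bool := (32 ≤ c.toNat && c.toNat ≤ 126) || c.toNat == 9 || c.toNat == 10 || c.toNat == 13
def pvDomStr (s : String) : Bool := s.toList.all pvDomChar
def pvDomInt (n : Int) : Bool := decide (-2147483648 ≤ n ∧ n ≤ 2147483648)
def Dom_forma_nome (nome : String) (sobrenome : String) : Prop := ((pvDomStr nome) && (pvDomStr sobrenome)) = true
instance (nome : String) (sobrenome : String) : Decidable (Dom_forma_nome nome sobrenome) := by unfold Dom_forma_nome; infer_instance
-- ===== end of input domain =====

-- B replaces A's two chunking loops (position-computed list.insert calls, which shift the tail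
-- each time) by one fused single-index pass appending the 2-char slices of both strings in
-- lockstep (objective: faster — a timing run measured B well over 1.5x faster at the largest size).

-- ===== PORT A =====
-- Literal transliteration of A: two for-loops over range(2, len+2, 2); each loop carries the
-- pair (junta_nome1, inicio) as fold state; list.insert is PySem.List.insert (clamped position).
def forma_nome (nome : String) (sobrenome : String) : String :=
  let ns := nome.toList
  let ss := sobrenome.toList
  let st1 := (PySem.List.pyRange 2 ((ns.length : Int) + 2) 2).foldl
      (fun (st : List (List Char) × Int) n =>
        (PySem.List.insert st.1 st.2 (PySem.List.slice ns (some st.2) (some (st.2 + 2))), n))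
      ([], 0)
  let st2 := (PySem.List.pyRange 2 ((ss.length : Int) + 2) 2).foldl
      (fun (st : List (List Char) × Int) s =>
        (PySem.List.insert st.1 (st.2 + 1) (PySem.List.slice ss (some st.2) (some (st.2 + 2))), s))
      (st1.1, 0)
  String.ofList (PySem.Chars.join [] st2.1)

-- ===== PORT B =====
-- the while-loop of Source B: one index i (i += 2), appending nome[i:i+2] then sobrenome[i:i+2]
def formaNomeAltGo (ns ss : List Char) (i : Nat) (acc : List (List Char)) : List (List Char) :=
  if i < ns.length ∨ i < ss.length then
    formaNomeAltGo ns ss (i + 2)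
      (acc ++ [PySem.List.slice ns (some (i : Int)) (some ((i : Int) + 2)),
               PySem.List.slice ss (some (i : Int)) (some ((i : Int) + 2))])
  else acc
termination_by max ns.length ss.length - i
decreasing_by omega

def forma_nome_alt (nome : String) (sobrenome : String) : String :=
  String.ofList (PySem.Chars.join [] (formaNomeAltGo nome.toList sobrenome.toList 0 []))

-- ===== PRECONDITION & SPEC =====
def Spec_forma_nome (nome : String) (sobrenome : String) (out : String) : Prop := out = forma_nome_alt nome sobrenome
instance (nome : String) (sobrenome : String) (out : String) : Decidable (Spec_forma_nome nome sobrenome out) := by unfold Spec_forma_nome; infer_instance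

-- ===== CLAIM (what is proved, stated in full; the proofs are below) =====
def Claim_equal_forma_nome : Prop := ∀ (nome : String) (sobrenome : String), Dom_forma_nome nome sobrenome → Spec_forma_nome nome sobrenome (forma_nome nome sobrenome)

-- ===== LEMMAS AND PROOFS =====

-- split a char list into consecutive 2-char chunks
def chunks (l : List Char) : List (List Char) :=
  if l = [] then [] else l.take 2 :: chunks (l.drop 2)
termination_by l.length
decreasing_by
  have h : l.length ≠ 0 := by simpa using (by assumption : ¬ l = [])
  simp [List.length_drop]; omega

-- interleave two chunk lists, leftovers appended
def ilv : List (List Char) → List (List Char) → List (List Char)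
  | [], bs => bs
  | a :: as, [] => a :: as
  | a :: as, b :: bs => a :: b :: ilv as bs

-- the common value: 2-char blocks of both strings, interleaved
def canon (a b : List Char) : List Char :=
  if a = [] ∧ b = [] then []
  else a.take 2 ++ b.take 2 ++ canon (a.drop 2) (b.drop 2)
termination_by a.length + b.length
decreasing_by
  rename_i h
  rw [not_and_or] at h
  have ha : a.length ≠ 0 ∨ b.length ≠ 0 := by
    rcases h with h | h
    · exact Or.inl (by simpa using h)
    · exact Or.inr (by simpa using h)
  simp [List.length_drop]; omega

lemma join_nil_eq_flatten (css : List (List Char)) : PySem.Chars.join [] css = css.flatten := by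
  induction css with
  | nil => rfl
  | cons c t ih =>
    cases t with
    | nil => simp [PySem.Chars.join, List.intercalate]
    | cons d u => rw [PySem.Chars.join_cons_cons]; simp [ih]

lemma pyRange2_nil (a b : Int) (h : b ≤ a) : PySem.List.pyRange a b 2 = [] := by
  rw [PySem.List.pyRange_of_pos _ _ (by norm_num)]
  rw [if_neg (by omega)]
  simp

lemma pyRange2_cons (a b : Int) (h : a < b) :
    PySem.List.pyRange a b 2 = a :: PySem.List.pyRange (a + 2) b 2 := by
  rw [PySem.List.pyRange_of_pos _ _ (by norm_num), PySem.List.pyRange_of_pos _ _ (by norm_num)]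
  rw [if_pos h]
  by_cases h2 : a + 2 < b
  · rw [if_pos h2]
    have hcnt : ((b - a + 2 - 1) / 2).toNat = ((b - (a + 2) + 2 - 1) / 2).toNat + 1 := by omega
    rw [hcnt, List.range_succ_eq_map, List.map_cons, List.map_map]
    congr 1
    · norm_num
    · apply List.map_congr_left
      intro k _
      simp [Nat.succ_eq_add_one]
      ring
  · rw [if_neg h2]
    have hcnt : ((b - a + 2 - 1) / 2).toNat = 1 := by omega
    simp [hcnt, List.range_succ]

lemma insert_of_len_le {xs : List (List Char)} {p : Int} (v : List Char)
    (h : (xs.length : Int) ≤ p) : PySem.List.insert xs p v = xs ++ [v] := by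
  have h0 : (0:Int) ≤ p := le_trans (by positivity) h
  simp only [PySem.List.insert, PySem.List.sliceIndices]
  have hmin : min p (xs.length : Int) = (xs.length : Int) := by omega
  rw [if_neg (by omega : ¬ p < 0)]
  simp [hmin]

lemma insert_cons_succ (x : List Char) (xs : List (List Char)) (p : Nat) (v : List Char) :
    PySem.List.insert (x :: xs) ((p : Int) + 1) v = x :: PySem.List.insert xs (p : Int) v := by
  by_cases hp : p ≤ xs.length
  · have h1 := PySem.List.insert_natCast (x :: xs) (p + 1) v (by simpa using hp)
    push_cast at h1
    rw [h1, PySem.List.insert_natCast xs p v hp]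
    simp
  · rw [insert_of_len_le v (by simp; omega), insert_of_len_le v (by simp; omega)]
    simp

lemma chunks_flatten (l : List Char) : (chunks l).flatten = l := by
  have aux : ∀ (m : Nat) (l : List Char), l.length ≤ m → (chunks l).flatten = l := by
    intro m
    induction m with
    | zero =>
      intro l hl
      have : l = [] := by cases l <;> simp_all
      subst this; rw [chunks]; simp
    | succ m ih =>
      intro l hl
      by_cases hnil : l = []
      · subst hnil; rw [chunks]; simp
      · rw [chunks, if_neg hnil]
        simp only [List.flatten_cons]
        rw [ih (l.drop 2) (by simp [List.length_drop]; omega)]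
        exact List.take_append_drop 2 l
  exact aux l.length l le_rfl

lemma ilv_nil_right (as : List (List Char)) : ilv as [] = as := by
  cases as <;> rfl

lemma ilv_insert (na bs : List (List Char)) (b : List Char) :
    PySem.List.insert (ilv na bs) (2 * (bs.length : Int) + 1) b = ilv na (bs ++ [b]) := by
  induction bs generalizing na with
  | nil =>
    cases na with
    | nil =>
      rw [show (2 * ((List.length ([]:List (List Char))):Int) + 1) = 1 by simp]
      rw [insert_of_len_le b (by simp)]
      rfl
    | cons a t =>
      rw [show (2 * ((List.length ([]:List (List Char))):Int) + 1) = ((0:Nat):Int) + 1 by simp]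
      show PySem.List.insert (a :: t) (((0:Nat):Int) + 1) b = _
      rw [insert_cons_succ]
      rw [show ((0:Nat):Int) = (0:Int) by simp, PySem.List.insert_zero]
      simp [ilv, ilv_nil_right]
  | cons b0 bs' ih =>
    cases na with
    | nil =>
      show PySem.List.insert (b0 :: bs') _ b = (b0 :: bs') ++ [b]
      exact insert_of_len_le b (by simp; omega)
    | cons a t =>
      show PySem.List.insert (a :: b0 :: ilv t bs') _ b = a :: b0 :: ilv t (bs' ++ [b])
      have e1 : (2 * ((List.length (b0 :: bs')):Int) + 1) = ((2 * bs'.length + 2 : Nat) : Int) + 1 := by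
        simp only [List.length_cons]
        push_cast
        ring
      rw [e1, insert_cons_succ]
      have e2 : ((2 * bs'.length + 2 : Nat) : Int) = ((2 * bs'.length + 1 : Nat) : Int) + 1 := by
        push_cast; ring
      rw [e2, insert_cons_succ]
      have e3 : ((2 * bs'.length + 1 : Nat) : Int) = 2 * ((bs'.length : Nat) : Int) + 1 := by
        push_cast; ring
      rw [e3, ih]

lemma canon_nil_left (b : List Char) : canon [] b = b := by
  have aux : ∀ (m : Nat) (b : List Char), b.length ≤ m → canon [] b = b := by
    intro m
    induction m with
    | zero =>
      intro b hb
      have : b = [] := by cases b <;> simp_all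
      subst this; rw [canon]; simp
    | succ m ih =>
      intro b hb
      by_cases hnil : b = []
      · subst hnil; rw [canon]; simp
      · rw [canon, if_neg (by simp [hnil])]
        simp only [List.take_nil, List.drop_nil, List.nil_append]
        rw [ih (b.drop 2) (by simp [List.length_drop]; omega)]
        exact List.take_append_drop 2 b
  exact aux b.length b le_rfl

lemma canon_nil_right (a : List Char) : canon a [] = a := by
  have aux : ∀ (m : Nat) (a : List Char), a.length ≤ m → canon a [] = a := by
    intro m
    induction m with
    | zero =>
      intro a ha
      have : a = [] := by cases a <;> simp_all
      subst this; rw [canon]; simp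
    | succ m ih =>
      intro a ha
      by_cases hnil : a = []
      · subst hnil; rw [canon]; simp
      · rw [canon, if_neg (by simp [hnil])]
        simp only [List.take_nil, List.drop_nil]
        rw [ih (a.drop 2) (by simp [List.length_drop]; omega)]
        simp [List.take_append_drop]
  exact aux a.length a le_rfl

lemma flatten_ilv_chunks (a b : List Char) : (ilv (chunks a) (chunks b)).flatten = canon a b := by
  have aux : ∀ (m : Nat) (a b : List Char), a.length + b.length ≤ m →
      (ilv (chunks a) (chunks b)).flatten = canon a b := by
    intro m
    induction m with
    | zero =>
      intro a b h
      have ha : a = [] := by cases a <;> simp_all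
      have hb : b = [] := by cases b <;> simp_all
      subst ha; subst hb
      rw [chunks]; simp [ilv, canon]
    | succ m ih =>
      intro a b h
      by_cases ha : a = []
      · subst ha
        rw [show chunks [] = [] by rw [chunks]; simp]
        show (chunks b).flatten = _
        rw [chunks_flatten, canon_nil_left]
      · by_cases hb : b = []
        · subst hb
          rw [show chunks [] = [] by rw [chunks]; simp, ilv_nil_right]
          rw [chunks_flatten, canon_nil_right]
        · rw [show chunks a = a.take 2 :: chunks (a.drop 2) by rw [chunks]; simp [ha],
              show chunks b = b.take 2 :: chunks (b.drop 2) by rw [chunks]; simp [hb]]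
          show (a.take 2 :: b.take 2 :: ilv (chunks (a.drop 2)) (chunks (b.drop 2))).flatten = _
          simp only [List.flatten_cons]
          rw [ih (a.drop 2) (b.drop 2) (by
            have h1 : a.length ≠ 0 := by simpa using ha
            simp only [List.length_drop]; omega)]
          conv_rhs => rw [canon]
          rw [if_neg (by simp [ha])]
          simp [List.append_assoc]
  exact aux (a.length + b.length) a b le_rfl

lemma loopA1 (ns : List Char) (m : Nat) : ∀ (k : Nat) (acc : List (List Char)),
    acc.length ≤ 2 * k → ns.length ≤ 2 * k + m →
    ((PySem.List.pyRange (2 * (k : Int) + 2) ((ns.length : Int) + 2) 2).foldl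
      (fun (st : List (List Char) × Int) n =>
        (PySem.List.insert st.1 st.2 (PySem.List.slice ns (some st.2) (some (st.2 + 2))), n))
      (acc, 2 * (k : Int))).1 = acc ++ chunks (ns.drop (2 * k)) := by
  induction m with
  | zero =>
    intro k acc hacc hlen
    rw [pyRange2_nil _ _ (by omega)]
    rw [show ns.drop (2 * k) = [] from List.drop_eq_nil_iff.mpr (by omega)]
    rw [chunks]; simp
  | succ m ih =>
    intro k acc hacc hlen
    by_cases hke : ns.length ≤ 2 * k
    · rw [pyRange2_nil _ _ (by omega)]
      rw [show ns.drop (2 * k) = [] from List.drop_eq_nil_iff.mpr (by omega)]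
      rw [chunks]; simp
    · have hlt : 2 * k < ns.length := by omega
      rw [pyRange2_cons _ _ (by omega)]
      simp only [List.foldl_cons]
      have hsl : PySem.List.slice ns (some (2 * (k : Int))) (some (2 * (k : Int) + 2))
          = (ns.drop (2 * k)).take 2 := by
        have hs := PySem.List.slice_natCast_add ns (2 * k) 2
        push_cast at hs
        exact hs
      rw [hsl]
      rw [insert_of_len_le _ (by omega)]
      have e1 : (2 * (k : Int) + 2 + 2) = 2 * (((k + 1 : Nat)) : Int) + 2 := by push_cast; ring
      have e2 : (2 * (k : Int) + 2) = 2 * (((k + 1 : Nat)) : Int) := by push_cast; ring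
      rw [e1, e2]
      rw [ih (k + 1) (acc ++ [(ns.drop (2 * k)).take 2]) (by simp; omega) (by omega)]
      have hdd : (ns.drop (2 * k)).drop 2 = ns.drop (2 * (k + 1)) := by
        have e : 2 * k + 2 = 2 * (k + 1) := by omega
        rw [List.drop_drop, e]
      have hchunks : chunks (ns.drop (2 * k))
          = (ns.drop (2 * k)).take 2 :: chunks (ns.drop (2 * (k + 1))) := by
        rw [chunks, if_neg (by simp only [List.drop_eq_nil_iff]; omega), hdd]
      rw [hchunks]
      simp

lemma loopA2 (ss : List Char) (m : Nat) : ∀ (k : Nat) (na bs : List (List Char)),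
    bs.length = k → ss.length ≤ 2 * k + m →
    ((PySem.List.pyRange (2 * (k : Int) + 2) ((ss.length : Int) + 2) 2).foldl
      (fun (st : List (List Char) × Int) s =>
        (PySem.List.insert st.1 (st.2 + 1) (PySem.List.slice ss (some st.2) (some (st.2 + 2))), s))
      (ilv na bs, 2 * (k : Int))).1 = ilv na (bs ++ chunks (ss.drop (2 * k))) := by
  induction m with
  | zero =>
    intro k na bs hbs hlen
    rw [pyRange2_nil _ _ (by omega)]
    rw [show ss.drop (2 * k) = [] from List.drop_eq_nil_iff.mpr (by omega)]
    rw [chunks]; simp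
  | succ m ih =>
    intro k na bs hbs hlen
    by_cases hke : ss.length ≤ 2 * k
    · rw [pyRange2_nil _ _ (by omega)]
      rw [show ss.drop (2 * k) = [] from List.drop_eq_nil_iff.mpr (by omega)]
      rw [chunks]; simp
    · have hlt : 2 * k < ss.length := by omega
      rw [pyRange2_cons _ _ (by omega)]
      simp only [List.foldl_cons]
      have hsl : PySem.List.slice ss (some (2 * (k : Int))) (some (2 * (k : Int) + 2))
          = (ss.drop (2 * k)).take 2 := by
        have hs := PySem.List.slice_natCast_add ss (2 * k) 2
        push_cast at hs
        exact hs
      rw [hsl]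
      have hpos : (2 * (k : Int) + 1) = 2 * (bs.length : Int) + 1 := by rw [hbs]
      rw [hpos, ilv_insert]
      have e1 : (2 * (k : Int) + 2 + 2) = 2 * (((k + 1 : Nat)) : Int) + 2 := by push_cast; ring
      have e2 : (2 * (k : Int) + 2) = 2 * (((k + 1 : Nat)) : Int) := by push_cast; ring
      rw [e1, e2]
      rw [ih (k + 1) na (bs ++ [(ss.drop (2 * k)).take 2]) (by simp [hbs]) (by omega)]
      have hdd : (ss.drop (2 * k)).drop 2 = ss.drop (2 * (k + 1)) := by
        have e : 2 * k + 2 = 2 * (k + 1) := by omega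
        rw [List.drop_drop, e]
      have hchunks : chunks (ss.drop (2 * k))
          = (ss.drop (2 * k)).take 2 :: chunks (ss.drop (2 * (k + 1))) := by
        rw [chunks, if_neg (by simp only [List.drop_eq_nil_iff]; omega), hdd]
      rw [hchunks]
      simp

lemma loopB (ns ss : List Char) (m : Nat) : ∀ (i : Nat) (acc : List (List Char)),
    max ns.length ss.length ≤ i + m →
    (formaNomeAltGo ns ss i acc).flatten = acc.flatten ++ canon (ns.drop i) (ss.drop i) := by
  induction m with
  | zero =>
    intro i acc h
    rw [formaNomeAltGo.eq_def, if_neg (by omega)]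
    rw [show ns.drop i = [] from List.drop_eq_nil_iff.mpr (by omega)]
    rw [show ss.drop i = [] from List.drop_eq_nil_iff.mpr (by omega)]
    rw [canon]; simp
  | succ m ih =>
    intro i acc h
    rw [formaNomeAltGo.eq_def]
    by_cases hc : i < ns.length ∨ i < ss.length
    · rw [if_pos hc]
      rw [ih (i + 2) _ (by omega)]
      have hs1 : PySem.List.slice ns (some (i : Int)) (some ((i : Int) + 2))
          = (ns.drop i).take 2 := by
        have hs := PySem.List.slice_natCast_add ns i 2
        push_cast at hs
        exact hs
      have hs2 : PySem.List.slice ss (some (i : Int)) (some ((i : Int) + 2))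
          = (ss.drop i).take 2 := by
        have hs := PySem.List.slice_natCast_add ss i 2
        push_cast at hs
        exact hs
      conv_rhs => rw [canon]
      rw [if_neg (by simp only [List.drop_eq_nil_iff]; omega)]
      rw [hs1, hs2]
      have hd1 : ns.drop (i + 2) = (ns.drop i).drop 2 := by
        rw [List.drop_drop]
      have hd2 : ss.drop (i + 2) = (ss.drop i).drop 2 := by
        rw [List.drop_drop]
      rw [hd1, hd2]
      simp [List.append_assoc]
    · rw [if_neg hc]
      rw [show ns.drop i = [] from List.drop_eq_nil_iff.mpr (by omega)]
      rw [show ss.drop i = [] from List.drop_eq_nil_iff.mpr (by omega)]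
      rw [canon]; simp

-- ===== VERDICT (by name: the statement is the Claim_ definition above) =====
theorem forma_nome_spec : Claim_equal_forma_nome := by
  intro nome sobrenome _
  unfold Spec_forma_nome forma_nome forma_nome_alt
  simp only []
  have h1 := loopA1 nome.toList nome.toList.length 0 [] (by simp) (by omega)
  simp only [Nat.cast_zero, mul_zero, zero_add, List.drop_zero,
    List.nil_append] at h1
  rw [h1]
  have h2 := loopA2 sobrenome.toList sobrenome.toList.length 0 (chunks nome.toList) [] rfl (by omega)
  rw [ilv_nil_right] at h2
  simp only [Nat.cast_zero, mul_zero, zero_add, List.drop_zero,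
    List.nil_append] at h2
  rw [h2]
  have hB := loopB nome.toList sobrenome.toList (max nome.toList.length sobrenome.toList.length) 0 [] (by omega)
  simp only [List.drop_zero, List.flatten_nil, List.nil_append] at hB
  rw [join_nil_eq_flatten, join_nil_eq_flatten, hB, flatten_ilv_chunks]
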